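-- pv_equiv track=rewrite | github.com/vsemenyakin/Space | OSINT/frames_TO_COMMIT.py | excludeRawArguments
-- ===== SOURCE A (Python) =====
-- def excludeRawArguments(stringWithPossibleArguments):
--   argumentsStart = stringWithPossibleArguments.find('@')
--
--   if argumentsStart == -1:
--     return None
--
--   argumentsEnd = stringWithPossibleArguments.find('@', argumentsStart + 1)
--   if argumentsEnd == -1:
--     return None
--
--   argumentsString = stringWithPossibleArguments[argumentsStart+1:argumentsEnd]
--
--   unstrippedRawArguments = argumentsString.split('_')
--   return [unstrippedRawArgument.strip() for unstrippedRawArgument in unstrippedRawArguments]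
-- ===== SOURCE B (Python) =====
-- def excludeRawArguments(stringWithPossibleArguments):
--   tokens = []
--   cur = None  # None = haven't seen the first '@' yet; else chars of the token being built
--   for ch in stringWithPossibleArguments:
--     if cur is None:
--       if ch == '@':
--         cur = []
--     elif ch == '@':
--       tokens.append(''.join(cur).strip())
--       return tokens
--     elif ch == '_':
--       tokens.append(''.join(cur).strip())
--       cur = []
--     else:
--       cur.append(ch)
--   return None
-- ===== Notes on version B (the rewrite author's own statement) =====
-- stated objective: alternative
-- what changed: Replaces A's staged find/find/slice/split/strip pipeline with a single left-to-right character scan: a state machine that starts collecting after the first '@', flushes a stripped token at each '_', and returns the accumulated token list as soon as the second '@' is seen (no find, no slicing, no split).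
import Mathlib
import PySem

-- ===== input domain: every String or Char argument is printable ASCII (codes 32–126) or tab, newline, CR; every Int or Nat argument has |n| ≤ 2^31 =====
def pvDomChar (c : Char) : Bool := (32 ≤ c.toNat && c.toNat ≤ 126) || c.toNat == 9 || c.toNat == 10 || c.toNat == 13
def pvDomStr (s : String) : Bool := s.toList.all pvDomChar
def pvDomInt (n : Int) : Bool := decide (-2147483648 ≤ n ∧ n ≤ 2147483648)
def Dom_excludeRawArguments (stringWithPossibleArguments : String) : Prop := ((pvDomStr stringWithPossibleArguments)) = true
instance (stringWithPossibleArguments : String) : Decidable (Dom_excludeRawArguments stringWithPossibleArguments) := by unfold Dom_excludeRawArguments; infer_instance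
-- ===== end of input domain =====

-- B replaces A's staged find/find/slice/split/strip pipeline with one left-to-right character
-- scan (a state machine that flushes a stripped token at each '_' and returns at the second '@').

-- ===== PORT A =====
-- literal transliteration of A: find first '@', find second '@' after it, slice between them, split on '_', strip each piece
def excludeRawArguments (stringWithPossibleArguments : String) : Option (List String) :=
  let argumentsStart := PySem.Str.find stringWithPossibleArguments "@"
  if argumentsStart = -1 then none
  else
    let argumentsEnd := PySem.Str.findFrom stringWithPossibleArguments "@" (argumentsStart + 1)
    if argumentsEnd = -1 then none
    else
      let argumentsString := PySem.Str.slice stringWithPossibleArguments (some (argumentsStart + 1)) (some argumentsEnd)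
      -- .split('_'): separator nonempty, so split? is always `some`; the getD [] default is never taken
      let unstrippedRawArguments := (PySem.Str.split? argumentsString "_").getD []
      some (unstrippedRawArguments.map (fun unstrippedRawArgument => PySem.Str.strip unstrippedRawArgument))

-- ===== PORT B =====
-- literal transliteration of Source B's for-loop: state is (tokens, cur); cur = none before the
-- first '@', some c while collecting the current token's chars; ''.join(cur).strip() is
-- PySem.Str.strip (String.ofList c); falling off the loop returns None.
def excludeRawArgumentsGo (l : List Char) (tokens : List String) (cur : Option (List Char)) : Option (List String) :=
  match l with
  | [] => none
  | ch :: rest =>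
    match cur with
    | none => if ch = '@' then excludeRawArgumentsGo rest tokens (some []) else excludeRawArgumentsGo rest tokens none
    | some c =>
      if ch = '@' then some (tokens ++ [PySem.Str.strip (String.ofList c)])
      else if ch = '_' then excludeRawArgumentsGo rest (tokens ++ [PySem.Str.strip (String.ofList c)]) (some [])
      else excludeRawArgumentsGo rest tokens (some (c ++ [ch]))

def excludeRawArguments_alt (stringWithPossibleArguments : String) : Option (List String) :=
  excludeRawArgumentsGo stringWithPossibleArguments.toList [] none

-- ===== PRECONDITION & SPEC =====
def Spec_excludeRawArguments (stringWithPossibleArguments : String) (out : Option (List String)) : Prop := out = excludeRawArguments_alt stringWithPossibleArguments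
instance (stringWithPossibleArguments : String) (out : Option (List String)) : Decidable (Spec_excludeRawArguments stringWithPossibleArguments out) := by unfold Spec_excludeRawArguments; infer_instance

-- ===== CLAIM (what is proved, stated in full; the proofs are below) =====
def Claim_equal_excludeRawArguments : Prop := ∀ (stringWithPossibleArguments : String), Dom_excludeRawArguments stringWithPossibleArguments → Spec_excludeRawArguments stringWithPossibleArguments (excludeRawArguments stringWithPossibleArguments)

-- ===== LEMMAS AND PROOFS =====

theorem find_go_eq (l : List Char) : ∀ k : Nat,
    PySem.Chars.find.go ['@'] l k =
      if '@' ∈ l then ((k : Int) + (l.takeWhile (· ≠ '@')).length) else -1 := by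
  induction l with
  | nil => intro k; simp [PySem.Chars.find.go]
  | cons x rest ih =>
    intro k
    rw [PySem.Chars.find.go]
    by_cases hx : x = '@'
    · subst hx
      simp [List.isPrefixOf, List.takeWhile]
    · have : ([ '@' ].isPrefixOf (x :: rest)) = false := by
        simp [List.isPrefixOf]; exact fun h => (hx h.symm).elim
      rw [this]
      simp only [Bool.false_eq_true, if_false]
      rw [ih (k+1)]
      by_cases hm : '@' ∈ rest
      · simp [hm, List.takeWhile, Ne.symm, hx]
        ring
      · simp [hm]
        intro e; exact absurd e.symm hx

theorem takeWhile_decomp {p r : List Char} (hp : '@' ∉ p) :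
    (p ++ '@' :: r).takeWhile (· ≠ '@') = p := by
  induction p with
  | nil => simp
  | cons a t ih =>
    simp only [List.mem_cons, not_or] at hp
    simp only [ne_eq, decide_not] at ih ⊢
    simp [Ne.symm hp.1, ih hp.2]

theorem mem_decomp {c : Char} {l : List Char} (h : c ∈ l) :
    ∃ p r, l = p ++ c :: r ∧ c ∉ p := by
  induction l with
  | nil => simp at h
  | cons x rest ih =>
    by_cases hx : x = c
    · exact ⟨[], rest, by simp [hx], by simp⟩
    · have hm : c ∈ rest := by
        rcases List.mem_cons.mp h with h1 | h1
        · exact absurd h1.symm hx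
        · exact h1
      obtain ⟨p, r, hl, hp⟩ := ih hm
      exact ⟨x :: p, r, by simp [hl], by simp [hp]; exact fun e => hx e.symm⟩

-- structural single-character split: reference model for Chars.splitOn with separator [sep]
def sp (sep : Char) : List Char → List (List Char)
  | [] => [[]]
  | x :: rest =>
    if x = sep then [] :: sp sep rest
    else
      match sp sep rest with
      | [] => [[x]]
      | p :: ps => (x :: p) :: ps

theorem sp_ne_nil (sep : Char) (l : List Char) : sp sep l ≠ [] := by
  cases l with
  | nil => simp [sp]
  | cons x rest =>
    simp only [sp]
    split
    · simp
    · cases h : sp sep rest <;> simp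

theorem sp_decomp {sep : Char} {p r : List Char} (hp : sep ∉ p) :
    sp sep (p ++ sep :: r) = p :: sp sep r := by
  induction p with
  | nil => simp [sp]
  | cons a t ih =>
    simp only [List.mem_cons, not_or] at hp
    have ih' := ih hp.2
    have ha : ¬ a = sep := fun e => hp.1 e.symm
    simp only [List.cons_append, sp, if_neg ha]
    rw [ih']

theorem sp_singleton {sep : Char} {l : List Char} (hl : sep ∉ l) :
    sp sep l = [l] := by
  induction l with
  | nil => simp [sp]
  | cons a t ih =>
    simp only [List.mem_cons, not_or] at hl
    have ha : ¬ a = sep := fun e => hl.1 e.symm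
    simp [sp, ha, ih hl.2]

theorem splitOn_go_eq (sep : Char) (fuel : Nat) :
    ∀ (l cur : List Char) (accs : List (List Char)), l.length < fuel →
      PySem.Chars.splitOn.go [sep] fuel l cur accs =
        accs.reverse ++ (cur.reverse ++ (sp sep l).headI) :: (sp sep l).tail := by
  induction fuel with
  | zero => intro l cur accs h; omega
  | succ n ih =>
    intro l cur accs h
    cases l with
    | nil =>
      rw [PySem.Chars.splitOn.go]
      simp [sp]
      omega
    | cons x rest =>
      rw [PySem.Chars.splitOn.go]
      by_cases hx : x = sep
      · subst hx
        have hpre : ([x].isPrefixOf (x :: rest)) = true := by simp [List.isPrefixOf]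
        rw [if_pos hpre]
        simp only [List.length_cons, List.length_nil, List.drop_succ_cons, List.drop_zero]
        rw [ih rest [] ((cur.reverse) :: accs) (by simp at h; omega)]
        have hnn := sp_ne_nil x rest
        cases hr : sp x rest with
        | nil => exact absurd hr hnn
        | cons p ps => simp [sp, hr]
      · have hpre : ([sep].isPrefixOf (x :: rest)) = false := by
          simp [List.isPrefixOf]; exact fun e => absurd e.symm hx
        rw [if_neg (by simp [hpre])]
        rw [ih rest (x :: cur) accs (by simp at h ⊢; omega)]
        cases hr : sp sep rest with
        | nil => exact absurd hr (sp_ne_nil sep rest)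
        | cons p ps => simp [sp, hx, hr]

theorem splitOn_eq_sp (sep : Char) (l : List Char) : PySem.Chars.splitOn l [sep] = sp sep l := by
  rw [PySem.Chars.splitOn, splitOn_go_eq sep (l.length + 1) l [] [] (by omega)]
  cases hr : sp sep l with
  | nil => exact absurd hr (sp_ne_nil sep l)
  | cons p ps => simp

theorem find_at (l : List Char) :
    PySem.Chars.find l ['@'] =
      if '@' ∈ l then (((l.takeWhile (· ≠ '@')).length : Nat) : Int) else -1 := by
  rw [PySem.Chars.find, find_go_eq]
  split <;> simp

-- B-side: before the first '@' nothing happens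
theorem bGo_skip {p : List Char} (hp : '@' ∉ p) (r : List Char) (tokens : List String) :
    excludeRawArgumentsGo (p ++ r) tokens none = excludeRawArgumentsGo r tokens none := by
  induction p with
  | nil => rfl
  | cons a t ih =>
    simp only [List.mem_cons, not_or] at hp
    rw [List.cons_append, excludeRawArgumentsGo, if_neg (fun e => hp.1 e.symm), ih hp.2]

theorem bGo_none_no_at {l : List Char} (hl : '@' ∉ l) (tokens : List String) :
    excludeRawArgumentsGo l tokens none = none := by
  induction l with
  | nil => rfl
  | cons a t ih =>
    simp only [List.mem_cons, not_or] at hl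
    rw [excludeRawArgumentsGo, if_neg (fun e => hl.1 e.symm), ih hl.2]

theorem bGo_some_no_at {r : List Char} (hr : '@' ∉ r) :
    ∀ (tokens : List String) (c : List Char),
      excludeRawArgumentsGo r tokens (some c) = none := by
  induction r with
  | nil => intro tokens c; rfl
  | cons a t ih =>
    intro tokens c
    simp only [List.mem_cons, not_or] at hr
    rw [excludeRawArgumentsGo]
    rw [if_neg (fun e => hr.1 e.symm)]
    by_cases ha : a = '_'
    · rw [if_pos ha, ih hr.2]
    · rw [if_neg ha, ih hr.2]

theorem bGo_collect {q : List Char} (hq : '@' ∉ q) :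
    ∀ (r2 : List Char) (tokens : List String) (c : List Char), '_' ∉ c →
      excludeRawArgumentsGo (q ++ '@' :: r2) tokens (some c) =
        some (tokens ++ (sp '_' (c ++ q)).map (fun t => PySem.Str.strip (String.ofList t))) := by
  induction q with
  | nil =>
    intro r2 tokens c hc
    rw [List.nil_append, excludeRawArgumentsGo, if_pos rfl]
    rw [List.append_nil, sp_singleton hc]
    simp
  | cons a t ih =>
    intro r2 tokens c hc
    simp only [List.mem_cons, not_or] at hq
    rw [List.cons_append, excludeRawArgumentsGo, if_neg (fun e => hq.1 e.symm)]
    by_cases ha : a = '_'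
    · subst ha
      rw [if_pos rfl, ih hq.2 r2 _ [] (by simp)]
      rw [sp_decomp hc]
      simp [sp]
    · rw [if_neg ha, ih hq.2 r2 tokens (c ++ [a]) (by simp [hc]; exact fun e => ha e.symm)]
      simp

theorem main_eq (s : String) : excludeRawArguments s = excludeRawArguments_alt s := by
  unfold excludeRawArguments excludeRawArguments_alt
  have hat : ("@" : String).toList = ['@'] := rfl
  by_cases h1 : '@' ∈ s.toList
  · obtain ⟨p, r, hl, hp⟩ := mem_decomp h1
    have hfind : PySem.Str.find s "@" = ((p.length : Nat) : Int) := by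
      rw [PySem.Str.find_eq, hat, find_at, if_pos h1, hl, takeWhile_decomp hp]
    have hlen : s.toList.length = p.length + 1 + r.length := by simp [hl]; omega
    have hdrop : s.toList.drop (p.length + 1) = r := by
      rw [hl, show p ++ '@' :: r = (p ++ ['@']) ++ r by simp]
      rw [List.drop_left' (by simp)]
    have hB : excludeRawArgumentsGo s.toList [] none = excludeRawArgumentsGo r [] (some []) := by
      rw [hl, show p ++ '@' :: r = (p ++ ['@']) ++ r by simp, List.append_assoc,
        bGo_skip hp, List.singleton_append, excludeRawArgumentsGo, if_pos rfl]
    rw [hfind]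
    rw [if_neg (by omega)]
    have hcast : ((p.length : Nat) : Int) + 1 = (((p.length + 1 : Nat)) : Int) := by push_cast; ring
    have hfrom : PySem.Str.findFrom s "@" (((p.length : Nat) : Int) + 1) =
        if PySem.Chars.find r ['@'] = -1 then -1 else ((p.length + 1 : Nat) : Int) + PySem.Chars.find r ['@'] := by
      rw [PySem.Str.findFrom_eq, hat, hcast, PySem.Chars.findFrom_natCast s.toList ['@'] (p.length+1) (by omega), hdrop]
    by_cases h2 : '@' ∈ r
    · obtain ⟨q, r2, hr, hq⟩ := mem_decomp h2
      have hfr : PySem.Chars.find r ['@'] = ((q.length : Nat) : Int) := by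
        rw [find_at, if_pos h2, hr, takeWhile_decomp hq]
      have hfrom2 : PySem.Str.findFrom s "@" (((p.length : Nat) : Int) + 1) = ((p.length + 1 : Nat) : Int) + ((q.length : Nat) : Int) := by
        rw [hfrom, hfr]; rw [if_neg (by omega)]
      rw [hfrom2]
      rw [if_neg (by push_cast; omega)]
      have hseg : PySem.Str.slice s (some (((p.length : Nat) : Int) + 1)) (some (((p.length + 1 : Nat) : Int) + ((q.length : Nat) : Int))) = String.ofList q := by
        rw [PySem.Str.slice, hcast, PySem.Chars.slice_eq_listSlice, PySem.List.slice_natCast_add, hdrop, hr, List.take_left' rfl]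
      rw [hseg]
      have hsplit : PySem.Str.split? (String.ofList q) "_" = some ((sp '_' q).map String.ofList) := by
        simp [PySem.Str.split?, PySem.Chars.split?, show ("_" : String).toList = ['_'] from rfl,
          splitOn_eq_sp]
      rw [hB, hr, bGo_collect hq r2 [] [] (by simp)]
      simp [hsplit, List.map_map, Function.comp]
    · have hfr : PySem.Chars.find r ['@'] = -1 := by rw [find_at, if_neg h2]
      rw [hfrom, if_pos hfr, if_pos rfl, hB, bGo_some_no_at h2]
  · have hf : PySem.Str.find s "@" = -1 := by
      rw [PySem.Str.find_eq, hat, find_at, if_neg h1]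
    rw [hf, if_pos rfl, bGo_none_no_at h1]

-- ===== VERDICT (by name: the statement is the Claim_ definition above) =====
theorem excludeRawArguments_spec : Claim_equal_excludeRawArguments := by
  intro s _
  unfold Spec_excludeRawArguments
  exact main_eq s
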